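-- pv_equiv track=rewrite | github.com/LahkLeKey/Banana | scripts/neuro/scope-models-from-event.py | scope_from_paths
-- ===== SOURCE A (Python) =====
-- ALL_MODELS = ("banana", "not-banana", "ripeness")
--
-- PATH_SCOPES = {
--     "banana": ("data/banana/", "scripts/train-banana-model.py"),
--     "not-banana": ("data/not-banana/", "scripts/train-not-banana-model.py"),
--     "ripeness": ("data/ripeness/", "scripts/train-ripeness-model.py"),
-- }
--
-- SHARED_PATHS = ("scripts/neuro/", "scripts/neuro_trace.py")
--
-- def scope_from_paths(paths: list[str]) -> list[str]:
--     selected: set[str] = set()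
--     for path in paths:
--         if any(path.startswith(p) for p in SHARED_PATHS):
--             return list(ALL_MODELS)
--         for model, prefixes in PATH_SCOPES.items():
--             if any(path.startswith(p) for p in prefixes):
--                 selected.add(model)
--     return [m for m in ALL_MODELS if m in selected]
-- ===== SOURCE B (Python) =====
-- ALL_MODELS = ("banana", "not-banana", "ripeness")
--
-- PATH_SCOPES = {
--     "banana": ("data/banana/", "scripts/train-banana-model.py"),
--     "not-banana": ("data/not-banana/", "scripts/train-not-banana-model.py"),
--     "ripeness": ("data/ripeness/", "scripts/train-ripeness-model.py"),
-- }
--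
-- SHARED_PATHS = ("scripts/neuro/", "scripts/neuro_trace.py")
--
-- def scope_from_paths(paths: list[str]) -> list[str]:
--     # Pass 1: any shared-scope path selects everything.
--     if any(path.startswith(p) for path in paths for p in SHARED_PATHS):
--         return list(ALL_MODELS)
--     # Pass 2: no set accumulator; scan the paths per model.
--     return [m for m in ALL_MODELS
--             if any(path.startswith(p) for path in paths for p in PATH_SCOPES[m])]
-- ===== Notes on version B (the rewrite author's own statement) =====
-- stated objective: simpler
-- what changed: The single early-returning pass that maintains a set accumulator is replaced by two accumulator-free passes: one any() over paths for the shared scope, then a per-model comprehension scanning the paths directly (loops transposed, set eliminated).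
import Mathlib
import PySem

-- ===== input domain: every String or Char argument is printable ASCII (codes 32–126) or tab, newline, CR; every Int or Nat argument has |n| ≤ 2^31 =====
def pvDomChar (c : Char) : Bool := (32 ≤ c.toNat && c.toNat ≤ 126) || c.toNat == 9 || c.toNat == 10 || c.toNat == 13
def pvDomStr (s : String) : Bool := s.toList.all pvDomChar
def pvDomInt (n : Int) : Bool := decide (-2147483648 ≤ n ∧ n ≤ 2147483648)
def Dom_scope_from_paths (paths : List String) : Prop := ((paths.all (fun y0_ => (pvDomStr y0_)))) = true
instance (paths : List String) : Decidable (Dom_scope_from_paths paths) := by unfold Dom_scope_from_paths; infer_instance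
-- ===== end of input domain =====

-- B replaces A's early-returning single pass with a set accumulator by two accumulator-free
-- passes (shared check first, then a per-model scan of the paths); objective: simpler.

-- Module constants shared by both ports
def pvAllModels : List String := ["banana", "not-banana", "ripeness"]
def pvPathScopes : List (String × List String) :=
  [("banana", ["data/banana/", "scripts/train-banana-model.py"]),
   ("not-banana", ["data/not-banana/", "scripts/train-not-banana-model.py"]),
   ("ripeness", ["data/ripeness/", "scripts/train-ripeness-model.py"])]
def pvSharedPaths : List String := ["scripts/neuro/", "scripts/neuro_trace.py"]

-- ===== PORT A =====
-- A's loop over paths: early return on a shared path, otherwise add matching models to 'selected'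
def scopeLoopA : List String → PySem.Set String → List String
  | [], selected => pvAllModels.filter (fun m => PySem.Set.contains selected m)
  | path :: rest, selected =>
    if pvSharedPaths.any (fun p => PySem.Str.startswith path p) then
      pvAllModels
    else
      scopeLoopA rest
        (pvPathScopes.foldl
          (fun sel mp =>
            if mp.2.any (fun p => PySem.Str.startswith path p) then PySem.Set.add sel mp.1
            else sel)
          selected)

def scope_from_paths (paths : List String) : List String :=
  scopeLoopA paths PySem.Set.empty

-- ===== PORT B =====
-- PATH_SCOPES[m]: every m comes from pvAllModels so the key is always present; getD is exact here
def scope_from_paths_alt (paths : List String) : List String :=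
  if paths.any (fun path => pvSharedPaths.any (fun p => PySem.Str.startswith path p)) then
    pvAllModels
  else
    pvAllModels.filter (fun m =>
      paths.any (fun path =>
        (PySem.Dict.getD (PySem.Dict.mk pvPathScopes) m []).any (fun p => PySem.Str.startswith path p)))

-- ===== PRECONDITION & SPEC =====
def Spec_scope_from_paths (paths : List String) (out : List String) : Prop := out = scope_from_paths_alt paths
instance (paths : List String) (out : List String) : Decidable (Spec_scope_from_paths paths out) := by unfold Spec_scope_from_paths; infer_instance

-- ===== CLAIM (what is proved, stated in full; the proofs are below) =====
def Claim_equal_scope_from_paths : Prop := ∀ (paths : List String), Dom_scope_from_paths paths → Spec_scope_from_paths paths (scope_from_paths paths)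

-- ===== LEMMAS AND PROOFS =====

-- B's per-model hit test
def pvHitB (path m : String) : Bool :=
  (PySem.Dict.getD (PySem.Dict.mk pvPathScopes) m []).any (fun p => PySem.Str.startswith path p)

lemma contains_step (sel : PySem.Set String) (path m : String) (hm : m ∈ pvAllModels) :
    PySem.Set.contains
      (pvPathScopes.foldl
        (fun sel mp =>
          if mp.2.any (fun p => PySem.Str.startswith path p) then PySem.Set.add sel mp.1
          else sel)
        sel) m
    = (PySem.Set.contains sel m || pvHitB path m) := by
  simp only [pvAllModels, List.mem_cons, List.not_mem_nil, or_false] at hm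
  rcases hm with h | h | h <;> subst h <;>
    simp [pvPathScopes, pvHitB, PySem.Set.add, PySem.Dict.getD, PySem.Dict.get?] <;>
    split_ifs <;>
    simp_all

lemma loopA_eq (paths : List String) (sel : PySem.Set String) :
    scopeLoopA paths sel =
      if paths.any (fun path => pvSharedPaths.any (fun p => PySem.Str.startswith path p)) then
        pvAllModels
      else
        pvAllModels.filter (fun m =>
          PySem.Set.contains sel m || paths.any (fun path => pvHitB path m)) := by
  induction paths generalizing sel with
  | nil => simp [scopeLoopA]
  | cons path rest ih =>
    simp only [scopeLoopA, List.any_cons]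
    by_cases hsh : (pvSharedPaths.any fun p => PySem.Str.startswith path p) = true
    · rw [if_pos hsh, hsh]
      simp
    · rw [if_neg hsh, ih]
      rw [Bool.not_eq_true] at hsh
      rw [hsh]
      simp only [Bool.false_or]
      by_cases hr : (rest.any fun path => pvSharedPaths.any fun p => PySem.Str.startswith path p) = true
      · rw [hr]
        simp
      · rw [Bool.not_eq_true] at hr
        rw [hr]
        simp only [Bool.false_eq_true, if_false]
        exact List.filter_congr (fun m hm => by
          rw [contains_step sel path m hm, Bool.or_assoc])

-- ===== VERDICT (by name: the statement is the Claim_ definition above) =====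
theorem scope_from_paths_spec : Claim_equal_scope_from_paths := by
  intro paths _
  unfold Spec_scope_from_paths scope_from_paths scope_from_paths_alt
  rw [loopA_eq]
  by_cases h : (paths.any fun path => pvSharedPaths.any fun p => PySem.Str.startswith path p) = true
  · rw [if_pos h, if_pos h]
  · rw [if_neg h, if_neg h]
    refine List.filter_congr fun m hm => ?_
    simp [pvHitB, PySem.Set.empty]
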